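-- pv_equiv track=rewrite | github.com/ketashi/Convert-decimal-binary-decimal | convert.py | bdecimal
-- ===== SOURCE A (Python) =====
-- def bdecimal(numbers):
--     content=""
--     for number in numbers:
--         data=0
--         number = number[::-1]
--         for c in range(len(number)):
--             if number[c] == "1":
--                 data += 2**c
--         content += str(data) + "."
--     content = content[:-1]
--     return content
-- ===== SOURCE B (Python) =====
-- def bdecimal(numbers):
--     def horner(number):
--         data = 0
--         for ch in number:
--             data = data * 2 + (1 if ch == "1" else 0)
--         return data
--     return ".".join(str(horner(n)) for n in numbers)
-- ===== Notes on version B (the rewrite author's own statement) =====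
-- stated objective: idiomatic
-- what changed: Replaces the reverse-and-sum-of-powers inner loop by a left-to-right Horner accumulator and replaces the trailing-dot-then-truncate concatenation by a single '.'.join over the converted numbers.
import Mathlib
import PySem

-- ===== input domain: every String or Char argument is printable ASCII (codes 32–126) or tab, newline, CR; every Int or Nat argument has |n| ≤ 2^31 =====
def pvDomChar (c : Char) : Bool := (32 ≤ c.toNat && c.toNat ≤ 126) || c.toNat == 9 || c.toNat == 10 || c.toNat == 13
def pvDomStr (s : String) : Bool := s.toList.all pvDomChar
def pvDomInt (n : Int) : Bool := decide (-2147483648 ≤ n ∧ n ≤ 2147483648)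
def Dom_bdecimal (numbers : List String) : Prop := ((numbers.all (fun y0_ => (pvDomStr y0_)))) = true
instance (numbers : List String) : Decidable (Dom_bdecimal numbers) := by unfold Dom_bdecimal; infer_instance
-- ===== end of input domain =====

-- B replaces A's reverse-and-sum-of-powers conversion by a Horner accumulator and the
-- trailing-dot concatenation by a '.'-join (objective: idiomatic).

-- ===== PORT A =====
-- inner loop of A: data = 0; for c in range(len(number)): if number[c] == "1": data += 2**c
-- (number already reversed)
def bdecimalAnum (rev : List Char) : Int :=
  (PySem.List.pyRange 0 rev.length 1).foldl
    (fun data c => if PySem.List.pyGet? rev c = some '1' then data + 2 ^ c.toNat else data) 0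

def bdecimal (numbers : List String) : String :=
  -- content += str(data) + "." over numbers, then content[:-1]
  String.ofList (PySem.List.slice
    (numbers.foldl
      (fun content number =>
        content ++ (PySem.Int.toStr (bdecimalAnum number.toList.reverse)).toList ++ ['.'])
      [])
    none (some (-1)))

-- ===== PORT B =====
def bdecimalHorner (number : String) : Int :=
  number.toList.foldl (fun data ch => data * 2 + (if ch = '1' then 1 else 0)) 0

def bdecimal_alt (numbers : List String) : String :=
  PySem.Str.join "." (numbers.map (fun n => PySem.Int.toStr (bdecimalHorner n)))

-- ===== PRECONDITION & SPEC =====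
def Spec_bdecimal (numbers : List String) (out : String) : Prop := out = bdecimal_alt numbers
instance (numbers : List String) (out : String) : Decidable (Spec_bdecimal numbers out) := by unfold Spec_bdecimal; infer_instance

-- ===== CLAIM (what is proved, stated in full; the proofs are below) =====
def Claim_equal_bdecimal : Prop := ∀ (numbers : List String), Dom_bdecimal numbers → Spec_bdecimal numbers (bdecimal numbers)

-- ===== LEMMAS AND PROOFS =====

/-- value of a big-endian bit list read little-endian from the front -/
def pvBinval (l : List Char) : Int :=
  match l with
  | [] => 0
  | c :: cs => (if c = '1' then 1 else 0) + 2 * pvBinval cs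

theorem pvBinval_append (l : List Char) (c : Char) :
    pvBinval (l ++ [c]) = pvBinval l + (if c = '1' then 1 else 0) * 2 ^ l.length := by
  induction l with
  | nil => simp [pvBinval]
  | cons x xs ih => simp [pvBinval, ih, pow_succ]; split_ifs <;> ring

theorem pvAnum_append (l : List Char) (c : Char) :
    bdecimalAnum (l ++ [c])
      = bdecimalAnum l + (if c = '1' then 1 else 0) * 2 ^ l.length := by
  unfold bdecimalAnum
  have hlen : ((l ++ [c]).length : Int) = (l.length : Int) + 1 := by simp
  rw [hlen, PySem.List.pyRange_one_succ_right (by positivity), List.foldl_append]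
  have hcongr :
      (PySem.List.pyRange 0 (l.length) 1).foldl
        (fun data k => if PySem.List.pyGet? (l ++ [c]) k = some '1' then data + 2 ^ k.toNat else data) (0 : Int)
      = (PySem.List.pyRange 0 (l.length) 1).foldl
        (fun data k => if PySem.List.pyGet? l k = some '1' then data + 2 ^ k.toNat else data) (0 : Int) := by
    apply PySem.List.foldl_congr_mem
    intro acc x hx
    rcases (PySem.List.mem_pyRange_one).1 hx with ⟨h0, h1⟩
    have hx' : x.toNat < l.length := by omega
    rw [← Int.toNat_of_nonneg h0, PySem.List.pyGet?_natCast, PySem.List.pyGet?_natCast,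
      List.getElem?_append_left hx']
  have hget : PySem.List.pyGet? (l ++ [c]) (l.length : Int) = some c := by
    simp
  simp only [List.foldl_cons, List.foldl_nil]
  rw [hcongr, hget]
  split_ifs with h <;> simp_all

theorem pvAnum_eq (rev : List Char) : bdecimalAnum rev = pvBinval rev := by
  induction rev using List.reverseRecOn with
  | nil => simp [bdecimalAnum, pvBinval]
  | append_singleton l c ih =>
    rw [pvAnum_append, pvBinval_append, ih]

theorem pvHornerAux (l : List Char) (acc : Int) :
    l.foldl (fun data ch => data * 2 + (if ch = '1' then 1 else 0)) acc
      = acc * 2 ^ l.length + pvBinval l.reverse := by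
  induction l generalizing acc with
  | nil => simp [pvBinval]
  | cons x xs ih =>
    rw [List.foldl_cons, ih]
    simp only [List.reverse_cons, pvBinval_append, List.length_reverse, List.length_cons,
      pow_succ]
    ring

theorem pvHorner_eq (s : String) : bdecimalHorner s = pvBinval s.toList.reverse := by
  unfold bdecimalHorner
  rw [pvHornerAux]
  simp

theorem pvNum_eq (s : String) : bdecimalAnum s.toList.reverse = bdecimalHorner s := by
  rw [pvAnum_eq, pvHorner_eq]

theorem pvFoldl_flatten {α : Type} (g : α → List Char) (acc : List Char) (xs : List α) :
    xs.foldl (fun c n => c ++ g n ++ ['.']) acc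
      = acc ++ (xs.map (fun n => g n ++ ['.'])).flatten := by
  induction xs generalizing acc with
  | nil => simp
  | cons x xs ih => rw [List.foldl_cons, ih]; simp

theorem pvDrop_join (ps : List (List Char)) :
    ((ps.map (fun p => p ++ ['.'])).flatten).dropLast = PySem.Chars.join ['.'] ps := by
  induction ps with
  | nil => simp [PySem.Chars.join_nil]
  | cons p rest ih =>
    cases rest with
    | nil => simp [PySem.Chars.join_singleton]
    | cons q rest' =>
      rw [PySem.Chars.join_cons_cons, ← ih]
      simp only [List.map_cons, List.flatten_cons, List.append_assoc]
      rw [List.dropLast_append_of_ne_nil (by simp), List.dropLast_append_of_ne_nil (by simp)]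

theorem bdecimal_spec : Claim_equal_bdecimal := by
  intro numbers _
  unfold Spec_bdecimal bdecimal bdecimal_alt
  simp only [pvFoldl_flatten (fun n : String => (PySem.Int.toStr (bdecimalAnum n.toList.reverse)).toList)]
  rw [PySem.List.slice_to_neg_one, List.nil_append]
  have h1 : (List.map (fun n : String => (PySem.Int.toStr (bdecimalAnum n.toList.reverse)).toList ++ ['.']) numbers)
      = List.map (fun p => p ++ ['.'])
          (List.map (fun n : String => (PySem.Int.toStr (bdecimalAnum n.toList.reverse)).toList) numbers) := by
    rw [List.map_map]; rfl
  have h2 : (PySem.Str.join "." (numbers.map (fun n => PySem.Int.toStr (bdecimalHorner n)))).toList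
      = PySem.Chars.join ['.']
          (List.map (fun n : String => (PySem.Int.toStr (bdecimalAnum n.toList.reverse)).toList) numbers) := by
    rw [PySem.Str.toList_join, List.map_map]
    simp [Function.comp_def, pvNum_eq, PySem.Int.toList_toStr]
  rw [h1, pvDrop_join, ← h2, String.ofList_toList]
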